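-- pv_equiv track=rewrite | github.com/eliottcassidy2000/math | 04-computation/modified_polynomial_search.py | build_omega_adj
-- ===== SOURCE A (Python) =====
-- def build_omega_adj(cycles):
--     """Build adjacency matrix (as list of sets for efficiency)."""
--     m = len(cycles)
--     adj = [set() for _ in range(m)]
--     for i in range(m):
--         si = set(cycles[i])
--         for j in range(i+1, m):
--             if si & set(cycles[j]):
--                 adj[i].add(j)
--                 adj[j].add(i)
--     return adj
-- ===== SOURCE B (Python) =====
-- def build_omega_adj(cycles):
--     """Build adjacency matrix (as list of sets for efficiency).
--
--     Inverted index: 'seen' maps each element to the set of indices of cycles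
--     already processed that contain it, so each new cycle finds its partners
--     directly from the buckets of its own elements instead of being intersected
--     against every other cycle.
--     """
--     seen = {}
--     adj = [set() for _ in cycles]
--     for j, cyc in enumerate(cycles):
--         partners = set()
--         for x in cyc:
--             bucket = seen.get(x, set())
--             partners |= bucket
--             seen[x] = bucket | {j}
--         partners.discard(j)
--         for i in sorted(partners):
--             adj[i].add(j)
--             adj[j].add(i)
--     return adj
-- ===== Notes on version B (the rewrite author's own statement) =====
-- stated objective: faster
-- what changed: Replaces the all-pairs set-intersection double loop by a single pass with an inverted index (element -> set of earlier cycles containing it): each cycle collects its partners from the buckets of its own elements, so no pairwise intersection test is ever performed.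
import Mathlib
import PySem

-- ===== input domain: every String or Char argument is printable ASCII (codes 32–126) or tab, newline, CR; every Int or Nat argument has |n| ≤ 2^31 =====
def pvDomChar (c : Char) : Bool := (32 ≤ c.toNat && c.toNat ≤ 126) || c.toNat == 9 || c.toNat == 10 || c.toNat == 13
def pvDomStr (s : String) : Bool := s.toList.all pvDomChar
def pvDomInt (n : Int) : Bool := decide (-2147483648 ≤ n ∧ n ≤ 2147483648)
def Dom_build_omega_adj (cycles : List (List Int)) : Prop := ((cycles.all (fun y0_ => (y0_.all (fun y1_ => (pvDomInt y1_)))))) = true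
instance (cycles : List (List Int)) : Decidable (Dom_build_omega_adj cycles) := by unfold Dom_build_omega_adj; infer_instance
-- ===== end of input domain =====

-- B replaces A's all-pairs set-intersection double loop by a single pass with an inverted
-- index (element -> set of earlier cycles containing it), collecting each cycle's partners
-- from the buckets of its own elements; no pairwise intersection test is performed.

-- ===== PORT A =====
def aInner (cycles : List (List Int)) (si : PySem.Set Int) (i : Int)
    (adj : List (List Int)) (j : Int) : List (List Int) :=
  if PySem.Set.inter si (PySem.Set.ofList (PySem.List.pyGetD cycles j [])) ≠ ([] : List Int) then
    let adj1 := PySem.List.pySetD adj i (PySem.Set.add (PySem.List.pyGetD adj i []) j)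
    PySem.List.pySetD adj1 j (PySem.Set.add (PySem.List.pyGetD adj1 j []) i)
  else adj

def aOuter (cycles : List (List Int)) (adj : List (List Int)) (i : Int) : List (List Int) :=
  let si := PySem.Set.ofList (PySem.List.pyGetD cycles i [])
  (PySem.List.pyRange (i + 1) (cycles.length : Int) 1).foldl (aInner cycles si i) adj

def build_omega_adj (cycles : List (List Int)) : List (List Int) :=
  let m : Int := (cycles.length : Int)
  let adj := (PySem.List.pyRange 0 m 1).map (fun _ => (PySem.Set.empty : PySem.Set Int))
  (PySem.List.pyRange 0 m 1).foldl (aOuter cycles) adj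

-- ===== PORT B =====
-- inner loop body: 'bucket = seen.get(x, set()); partners |= bucket; seen[x] = bucket | {j}'
def bInner (j : Int) (q : PySem.Set Int × PySem.Dict Int (PySem.Set Int)) (x : Int) :
    PySem.Set Int × PySem.Dict Int (PySem.Set Int) :=
  let bucket := PySem.Dict.getD q.2 x PySem.Set.empty
  (PySem.Set.union q.1 bucket, PySem.Dict.insert q.2 x (PySem.Set.union bucket [j]))

-- 'adj[i].add(j); adj[j].add(i)'
def bUpd (j : Int) (adj : List (List Int)) (i : Int) : List (List Int) :=
  let adj1 := PySem.List.pySetD adj i (PySem.Set.add (PySem.List.pyGetD adj i []) j)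
  PySem.List.pySetD adj1 j (PySem.Set.add (PySem.List.pyGetD adj1 j []) i)

-- one iteration of 'for j, cyc in enumerate(cycles): …'
def bStep (st : PySem.Dict Int (PySem.Set Int) × List (List Int)) (p : Int × List Int) :
    PySem.Dict Int (PySem.Set Int) × List (List Int) :=
  let pr := p.2.foldl (bInner p.1) ((PySem.Set.empty : PySem.Set Int), st.1)
  let partners := PySem.Set.discard pr.1 p.1
  (pr.2, (PySem.List.sorted partners (fun x => x) false).foldl (bUpd p.1) st.2)

def build_omega_adj_alt (cycles : List (List Int)) : List (List Int) :=
  let adj0 := cycles.map (fun _ => (PySem.Set.empty : PySem.Set Int))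
  ((PySem.List.enumerate cycles 0).foldl bStep
      ((PySem.Dict.empty : PySem.Dict Int (PySem.Set Int)), adj0)).2

-- ===== PRECONDITION & SPEC =====
def Spec_build_omega_adj (cycles : List (List Int)) (out : List (List Int)) : Prop := out = build_omega_adj_alt cycles
instance (cycles : List (List Int)) (out : List (List Int)) : Decidable (Spec_build_omega_adj cycles out) := by unfold Spec_build_omega_adj; infer_instance

-- ===== CLAIM (what is proved, stated in full; the proofs are below) =====
def Claim_equal_build_omega_adj : Prop := ∀ (cycles : List (List Int)), Dom_build_omega_adj cycles → Spec_build_omega_adj cycles (build_omega_adj cycles)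

-- ===== LEMMAS AND PROOFS =====

-- the set of cycle k's elements
def pvSets (cycles : List (List Int)) (k : Int) : PySem.Set Int :=
  PySem.Set.ofList (PySem.List.pyGetD cycles k [])

-- cycles k and j share an element (abbrev so that `decide` finds the instance)
abbrev pvOv (cycles : List (List Int)) (k j : Int) : Prop :=
  ∃ x, x ∈ pvSets cycles k ∧ x ∈ pvSets cycles j

-- A-SIDE characterization: row k after A's outer iterations i < t have finished
def pvT (cycles : List (List Int)) (t k j : Int) : Bool :=
  decide (j ≠ k ∧ pvOv cycles k j ∧ min j k < t)

def pvRow (cycles : List (List Int)) (t k : Int) : List Int :=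
  (PySem.List.pyRange 0 (cycles.length : Int) 1).filter (pvT cycles t k)

-- row k during A's outer iteration i, inner index at u
def pvQ (cycles : List (List Int)) (i u k j : Int) : Bool :=
  decide (j ≠ k ∧ pvOv cycles k j ∧ (min j k < i ∨ (min j k = i ∧ max j k < u)))

def pvRowQ (cycles : List (List Int)) (i u k : Int) : List Int :=
  (PySem.List.pyRange 0 (cycles.length : Int) 1).filter (pvQ cycles i u k)

def pvAdj (cycles : List (List Int)) (r : Int → List Int) : List (List Int) :=
  (PySem.List.pyRange 0 (cycles.length : Int) 1).map r

-- B-SIDE characterization: row k after B's outer iterations j < t have finished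
def pvTB (cycles : List (List Int)) (t k j : Int) : Bool :=
  decide (j ≠ k ∧ pvOv cycles k j ∧ max j k < t)

def pvRowB (cycles : List (List Int)) (t k : Int) : List Int :=
  (PySem.List.pyRange 0 (cycles.length : Int) 1).filter (pvTB cycles t k)

-- row k during B's outer iteration j, partner scan at v
def pvQB (cycles : List (List Int)) (j v k j' : Int) : Bool :=
  decide (j' ≠ k ∧ pvOv cycles k j' ∧ (max j' k < j ∨ (max j' k = j ∧ min j' k < v)))

def pvRowQB (cycles : List (List Int)) (j v k : Int) : List Int :=
  (PySem.List.pyRange 0 (cycles.length : Int) 1).filter (pvQB cycles j v k)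

-- invariant of B's dict 'seen' after t outer iterations
def pvSeenInv (cycles : List (List Int)) (t : Int) (seen : PySem.Dict Int (PySem.Set Int)) : Prop :=
  ∀ x : Int, (seen.getD x []).Nodup ∧
    ∀ i : Int, i ∈ seen.getD x [] ↔ (0 ≤ i ∧ i < t ∧ x ∈ PySem.List.pyGetD cycles i [])

lemma pv_ov_symm {cycles : List (List Int)} {k j : Int} (h : pvOv cycles k j) :
    pvOv cycles j k := by
  obtain ⟨x, h1, h2⟩ := h; exact ⟨x, h2, h1⟩

lemma pv_inter_ne_nil (s t : PySem.Set Int) :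
    (PySem.Set.inter s t ≠ ([] : List Int)) ↔ ∃ x, x ∈ s ∧ x ∈ t := by
  constructor
  · intro h
    obtain ⟨x, hx⟩ := List.exists_mem_of_ne_nil _ h
    exact ⟨x, (PySem.Set.mem_inter s t x).mp hx⟩
  · rintro ⟨x, hx1, hx2⟩ h
    have hx : x ∈ PySem.Set.inter s t := (PySem.Set.mem_inter s t x).mpr ⟨hx1, hx2⟩
    rw [h] at hx
    simp at hx

lemma pv_filter_snoc (P P' : Int → Bool) (a m : Int) (h0 : 0 ≤ a) (ham : a < m)
    (hne : ∀ j, j ≠ a → P' j = P j) (hPa : P a = false) (hP'a : P' a = true)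
    (htail : ∀ j, a < j → P j = false) (htail' : ∀ j, a < j → P' j = false) :
    (PySem.List.pyRange 0 m 1).filter P' = (PySem.List.pyRange 0 m 1).filter P ++ [a] := by
  rw [PySem.List.pyRange_one_append 0 a m h0 (le_of_lt ham),
      PySem.List.pyRange_one_cons ham]
  simp only [List.filter_append, List.filter_cons, hPa, hP'a]
  have e1 : (PySem.List.pyRange 0 a 1).filter P' = (PySem.List.pyRange 0 a 1).filter P := by
    apply List.filter_congr
    intro j hj
    have := (PySem.List.mem_pyRange_one).mp hj
    exact hne j (by omega)
  have e2 : (PySem.List.pyRange (a + 1) m 1).filter P' = [] := by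
    apply List.filter_eq_nil_iff.mpr
    intro j hj
    have := (PySem.List.mem_pyRange_one).mp hj
    simp [htail' j (by omega)]
  have e3 : (PySem.List.pyRange (a + 1) m 1).filter P = [] := by
    apply List.filter_eq_nil_iff.mpr
    intro j hj
    have := (PySem.List.mem_pyRange_one).mp hj
    simp [htail j (by omega)]
  simp [e1, e2, e3]

lemma pv_set_map (m : Int) (r : Int → List Int) (i : Int) (v : List Int)
    (h0 : 0 ≤ i) (him : i < m) :
    ((PySem.List.pyRange 0 m 1).map r).set i.toNat v
      = (PySem.List.pyRange 0 m 1).map (fun k => if k = i then v else r k) := by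
  apply List.ext_getElem
  · simp only [List.length_set, List.length_map]
  · intro n h1 h2
    have hn : ∀ (h : n < (PySem.List.pyRange 0 m 1).length),
        (PySem.List.pyRange 0 m 1)[n] = (n : Int) := by
      intro h
      rw [PySem.List.getElem_pyRange_one]
      omega
    simp only [List.getElem_set, List.getElem_map, hn]
    by_cases hni : i.toNat = n
    · rw [if_pos hni, if_pos (by omega)]
    · rw [if_neg hni, if_neg (by omega)]

lemma pv_getD_adj (cycles : List (List Int)) (r : Int → List Int) (i : Int)
    (h0 : 0 ≤ i) (him : i < (cycles.length : Int)) :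
    PySem.List.pyGetD (pvAdj cycles r) i [] = r i := by
  unfold pvAdj
  exact PySem.List.pyGetD_map_pyRange_of_nonneg r _ i [] h0 him

lemma pv_inner_step (cycles : List (List Int)) (i u : Int)
    (h0 : 0 ≤ i) (hiu : i < u) (hum : u < (cycles.length : Int)) :
    aInner cycles (pvSets cycles i) i (pvAdj cycles (pvRowQ cycles i u)) u
      = pvAdj cycles (pvRowQ cycles i (u + 1)) := by
  have hc : (PySem.Set.inter (pvSets cycles i)
      (PySem.Set.ofList (PySem.List.pyGetD cycles u [])) ≠ ([] : List Int)) ↔ pvOv cycles i u :=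
    pv_inter_ne_nil _ _
  unfold aInner
  by_cases hov : pvOv cycles i u
  · rw [if_pos (hc.mpr hov)]
    have hgi : PySem.List.pyGetD (pvAdj cycles (pvRowQ cycles i u)) i [] = pvRowQ cycles i u i :=
      pv_getD_adj cycles _ i h0 (by omega)
    have hnm1 : u ∉ pvRowQ cycles i u i := by
      intro hmem
      have h2 := (List.mem_filter.mp hmem).2
      simp only [pvQ, decide_eq_true_eq] at h2
      obtain ⟨a, b, c⟩ := h2
      omega
    have e1 : PySem.Set.add (pvRowQ cycles i u i) u = pvRowQ cycles i (u + 1) i := by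
      rw [PySem.Set.add_of_not_mem hnm1]
      unfold pvRowQ
      refine (pv_filter_snoc (pvQ cycles i u i) (pvQ cycles i (u + 1) i) u _ (by omega) hum
        ?_ ?_ ?_ ?_ ?_).symm
      · intro j hj
        simp only [pvQ]
        apply decide_eq_decide.mpr
        constructor
        · rintro ⟨a, b, c⟩; exact ⟨a, b, by omega⟩
        · rintro ⟨a, b, c⟩; exact ⟨a, b, by omega⟩
      · simp only [pvQ, decide_eq_false_iff_not]
        rintro ⟨a, b, c⟩; omega
      · simp only [pvQ, decide_eq_true_eq]
        exact ⟨by omega, hov, by omega⟩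
      · intro j hj
        simp only [pvQ, decide_eq_false_iff_not]
        rintro ⟨a, b, c⟩; omega
      · intro j hj
        simp only [pvQ, decide_eq_false_iff_not]
        rintro ⟨a, b, c⟩; omega
    have e2 : PySem.List.pySetD (pvAdj cycles (pvRowQ cycles i u)) i (pvRowQ cycles i (u + 1) i)
        = pvAdj cycles (fun k => if k = i then pvRowQ cycles i (u + 1) i else pvRowQ cycles i u k) := by
      rw [PySem.List.pySetD_of_nonneg _ _ h0]
      unfold pvAdj
      exact pv_set_map _ _ _ _ h0 (by omega)
    simp only [hgi]
    rw [e1, e2]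
    have hgu : PySem.List.pyGetD
        (pvAdj cycles (fun k => if k = i then pvRowQ cycles i (u + 1) i else pvRowQ cycles i u k))
        u [] = pvRowQ cycles i u u := by
      rw [pv_getD_adj cycles _ u (by omega) hum]
      rw [if_neg (by omega)]
    have hnm2 : i ∉ pvRowQ cycles i u u := by
      intro hmem
      have h2 := (List.mem_filter.mp hmem).2
      simp only [pvQ, decide_eq_true_eq] at h2
      obtain ⟨a, b, c⟩ := h2
      omega
    have e3 : PySem.Set.add (pvRowQ cycles i u u) i = pvRowQ cycles i (u + 1) u := by
      rw [PySem.Set.add_of_not_mem hnm2]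
      unfold pvRowQ
      refine (pv_filter_snoc (pvQ cycles i u u) (pvQ cycles i (u + 1) u) i _ h0 (by omega)
        ?_ ?_ ?_ ?_ ?_).symm
      · intro j hj
        simp only [pvQ]
        apply decide_eq_decide.mpr
        constructor
        · rintro ⟨a, b, c⟩; exact ⟨a, b, by omega⟩
        · rintro ⟨a, b, c⟩; exact ⟨a, b, by omega⟩
      · simp only [pvQ, decide_eq_false_iff_not]
        rintro ⟨a, b, c⟩; omega
      · simp only [pvQ, decide_eq_true_eq]
        exact ⟨by omega, pv_ov_symm hov, by omega⟩
      · intro j hj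
        simp only [pvQ, decide_eq_false_iff_not]
        rintro ⟨a, b, c⟩; omega
      · intro j hj
        simp only [pvQ, decide_eq_false_iff_not]
        rintro ⟨a, b, c⟩; omega
    rw [hgu, e3]
    rw [PySem.List.pySetD_of_nonneg _ _ (by omega : (0:Int) ≤ u)]
    unfold pvAdj
    rw [pv_set_map _ _ _ _ (by omega) hum]
    apply List.map_congr_left
    intro k hk
    have hk' := (PySem.List.mem_pyRange_one).mp hk
    by_cases hku : k = u
    · rw [if_pos hku, hku]
    · rw [if_neg hku]
      by_cases hki : k = i
      · rw [if_pos hki, hki]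
      · rw [if_neg hki]
        unfold pvRowQ
        apply List.filter_congr
        intro j hj
        simp only [pvQ]
        apply decide_eq_decide.mpr
        constructor
        · rintro ⟨a, b, c⟩; exact ⟨a, b, by omega⟩
        · rintro ⟨a, b, c⟩; exact ⟨a, b, by omega⟩
  · rw [if_neg (fun h => hov (hc.mp h))]
    unfold pvAdj
    apply List.map_congr_left
    intro k hk
    unfold pvRowQ
    apply List.filter_congr
    intro j hj
    simp only [pvQ]
    apply decide_eq_decide.mpr
    constructor
    · rintro ⟨a, b, c⟩; exact ⟨a, b, by omega⟩
    · rintro ⟨a, b, c⟩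
      refine ⟨a, b, ?_⟩
      rcases c with c | ⟨c1, c2⟩
      · exact Or.inl c
      · by_cases hmu : max j k < u
        · exact Or.inr ⟨c1, hmu⟩
        · exfalso
          have hcase : (k = i ∧ j = u) ∨ (k = u ∧ j = i) := by omega
          rcases hcase with ⟨hk1, hj1⟩ | ⟨hk1, hj1⟩
          · subst hk1; subst hj1; exact hov b
          · subst hk1; subst hj1; exact hov (pv_ov_symm b)

lemma pv_inner_fold (cycles : List (List Int)) (i : Int) (h0 : 0 ≤ i) :
    ∀ (n : Nat) (u : Int), i < u → u ≤ (cycles.length : Int) →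
      ((cycles.length : Int) - u).toNat = n →
      (PySem.List.pyRange u (cycles.length : Int) 1).foldl
          (aInner cycles (pvSets cycles i) i) (pvAdj cycles (pvRowQ cycles i u))
        = pvAdj cycles (pvRowQ cycles i (cycles.length : Int)) := by
  intro n
  induction n with
  | zero =>
    intro u hiu hum hn
    have hum' : u = (cycles.length : Int) := by omega
    subst hum'
    rw [PySem.List.pyRange_one_eq_nil (le_refl _)]
    rfl
  | succ n ih =>
    intro u hiu hum hn
    have hlt : u < (cycles.length : Int) := by omega
    rw [PySem.List.pyRange_one_cons hlt]
    simp only [List.foldl_cons]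
    rw [pv_inner_step cycles i u h0 hiu hlt]
    exact ih (u + 1) (by omega) (by omega) (by omega)

lemma pv_rowq_start (cycles : List (List Int)) (i : Int) :
    pvAdj cycles (pvRow cycles i) = pvAdj cycles (pvRowQ cycles i (i + 1)) := by
  unfold pvAdj
  apply List.map_congr_left
  intro k hk
  unfold pvRow pvRowQ
  apply List.filter_congr
  intro j hj
  simp only [pvT, pvQ]
  apply decide_eq_decide.mpr
  constructor
  · rintro ⟨a, b, c⟩; exact ⟨a, b, Or.inl c⟩
  · rintro ⟨a, b, c⟩; exact ⟨a, b, by omega⟩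

lemma pv_rowq_end (cycles : List (List Int)) (i : Int) :
    pvAdj cycles (pvRowQ cycles i (cycles.length : Int))
      = pvAdj cycles (pvRow cycles (i + 1)) := by
  unfold pvAdj
  apply List.map_congr_left
  intro k hk
  have hk' := (PySem.List.mem_pyRange_one).mp hk
  unfold pvRow pvRowQ
  apply List.filter_congr
  intro j hj
  have hj' := (PySem.List.mem_pyRange_one).mp hj
  simp only [pvT, pvQ]
  apply decide_eq_decide.mpr
  constructor
  · rintro ⟨a, b, c⟩; exact ⟨a, b, by omega⟩
  · rintro ⟨a, b, c⟩; exact ⟨a, b, by omega⟩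

lemma pv_outer_step (cycles : List (List Int)) (i : Int)
    (h0 : 0 ≤ i) (him : i < (cycles.length : Int)) :
    aOuter cycles (pvAdj cycles (pvRow cycles i)) i = pvAdj cycles (pvRow cycles (i + 1)) := by
  show (PySem.List.pyRange (i + 1) (cycles.length : Int) 1).foldl
      (aInner cycles (PySem.Set.ofList (PySem.List.pyGetD cycles i [])) i)
      (pvAdj cycles (pvRow cycles i)) = _
  rw [pv_rowq_start cycles i]
  have hsi : PySem.Set.ofList (PySem.List.pyGetD cycles i []) = pvSets cycles i := rfl
  rw [hsi, pv_inner_fold cycles i h0 ((cycles.length : Int) - (i + 1)).toNat (i + 1)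
      (by omega) (by omega) rfl]
  exact pv_rowq_end cycles i

lemma pv_outer_fold (cycles : List (List Int)) :
    ∀ (n : Nat) (t : Int), 0 ≤ t → t ≤ (cycles.length : Int) →
      ((cycles.length : Int) - t).toNat = n →
      (PySem.List.pyRange t (cycles.length : Int) 1).foldl (aOuter cycles)
          (pvAdj cycles (pvRow cycles t))
        = pvAdj cycles (pvRow cycles (cycles.length : Int)) := by
  intro n
  induction n with
  | zero =>
    intro t h0 htm hn
    have ht : t = (cycles.length : Int) := by omega
    subst ht
    rw [PySem.List.pyRange_one_eq_nil (le_refl _)]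
    rfl
  | succ n ih =>
    intro t h0 htm hn
    have hlt : t < (cycles.length : Int) := by omega
    rw [PySem.List.pyRange_one_cons hlt]
    simp only [List.foldl_cons]
    rw [pv_outer_step cycles t h0 hlt]
    exact ih (t + 1) (by omega) (by omega) (by omega)

lemma pv_A_eq (cycles : List (List Int)) :
    build_omega_adj cycles = pvAdj cycles (pvRow cycles (cycles.length : Int)) := by
  show (PySem.List.pyRange 0 (cycles.length : Int) 1).foldl (aOuter cycles)
      ((PySem.List.pyRange 0 (cycles.length : Int) 1).map
        (fun _ => (PySem.Set.empty : PySem.Set Int))) = _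
  have hinit : (PySem.List.pyRange 0 (cycles.length : Int) 1).map
      (fun _ => (PySem.Set.empty : PySem.Set Int)) = pvAdj cycles (pvRow cycles 0) := by
    unfold pvAdj
    apply List.map_congr_left
    intro k hk
    have hk' := (PySem.List.mem_pyRange_one).mp hk
    unfold pvRow
    have hnil : (PySem.List.pyRange 0 (cycles.length : Int) 1).filter (pvT cycles 0 k) = [] := by
      apply List.filter_eq_nil_iff.mpr
      intro j hj
      have hj' := (PySem.List.mem_pyRange_one).mp hj
      simp only [pvT, decide_eq_true_eq]
      rintro ⟨a, b, c⟩
      omega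
    rw [hnil]
    rfl
  rw [hinit]
  exact pv_outer_fold cycles (cycles.length : Int).toNat 0 (le_refl _) (by omega) (by omega)

-- ============ B-side proof ============

-- the inner fold over cycles[j] accumulates partners and pushes j into the touched buckets
lemma pv_bInner_fold (cycles : List (List Int)) (j : Int) :
    ∀ (c pre : List Int) (P : PySem.Set Int) (seen : PySem.Dict Int (PySem.Set Int)),
      P.Nodup →
      (∀ i, i ≠ j → (i ∈ P ↔ ∃ x ∈ pre, 0 ≤ i ∧ i < j ∧ x ∈ PySem.List.pyGetD cycles i [])) →
      (∀ x, ((seen.getD x []).Nodup ∧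
        ∀ i, i ∈ seen.getD x [] ↔
          ((0 ≤ i ∧ i < j ∧ x ∈ PySem.List.pyGetD cycles i []) ∨ (i = j ∧ x ∈ pre)))) →
      (c.foldl (bInner j) (P, seen)).1.Nodup ∧
      (∀ i, i ≠ j → ((i ∈ (c.foldl (bInner j) (P, seen)).1) ↔
          ∃ x ∈ pre ++ c, 0 ≤ i ∧ i < j ∧ x ∈ PySem.List.pyGetD cycles i [])) ∧
      (∀ x, (((c.foldl (bInner j) (P, seen)).2.getD x []).Nodup ∧
        ∀ i, i ∈ (c.foldl (bInner j) (P, seen)).2.getD x [] ↔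
          ((0 ≤ i ∧ i < j ∧ x ∈ PySem.List.pyGetD cycles i []) ∨ (i = j ∧ x ∈ pre ++ c)))) := by
  intro c
  induction c with
  | nil =>
    intro pre P seen hnd hP hS
    refine ⟨hnd, ?_, ?_⟩
    · intro i hij; simpa using hP i hij
    · intro x; simpa using hS x
  | cons x c ih =>
    intro pre P seen hnd hP hS
    simp only [List.foldl_cons]
    have hres := ih (pre ++ [x])
      (PySem.Set.union P (seen.getD x []))
      (seen.insert x (PySem.Set.union (seen.getD x []) [j]))
      (PySem.Set.nodup_union _ _ hnd)
      (by
        intro i hij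
        rw [PySem.Set.mem_union]
        rw [hP i hij, ((hS x).2 i)]
        constructor
        · rintro (⟨y, hy1, hy2⟩ | h)
          · exact ⟨y, by simp [hy1], hy2⟩
          · rcases h with ⟨h1, h2, h3⟩ | ⟨h1, _⟩
            · exact ⟨x, by simp, h1, h2, h3⟩
            · exact absurd h1 hij
        · rintro ⟨y, hy1, hy2⟩
          rcases List.mem_append.mp hy1 with hy1 | hy1
          · exact Or.inl ⟨y, hy1, hy2⟩
          · simp only [List.mem_singleton] at hy1
            subst hy1
            exact Or.inr (Or.inl hy2))
      (by
        intro y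
        by_cases hyx : y = x
        · subst hyx
          rw [PySem.Dict.getD_insert]
          rw [if_pos rfl]
          refine ⟨PySem.Set.nodup_union _ _ (hS y).1, ?_⟩
          intro i
          rw [PySem.Set.mem_union, ((hS y).2 i)]
          constructor
          · rintro ((h | ⟨h1, _⟩) | h)
            · exact Or.inl h
            · exact Or.inr ⟨h1, by simp⟩
            · simp only [List.mem_singleton] at h
              exact Or.inr ⟨h, by simp⟩
          · rintro (h | ⟨h1, _⟩)
            · exact Or.inl (Or.inl h)
            · subst h1; simp
        · rw [PySem.Dict.getD_insert, if_neg hyx]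
          refine ⟨(hS y).1, ?_⟩
          intro i
          rw [((hS y).2 i)]
          constructor
          · rintro (h | ⟨h1, h2⟩)
            · exact Or.inl h
            · exact Or.inr ⟨h1, by simp [h2]⟩
          · rintro (h | ⟨h1, h2⟩)
            · exact Or.inl h
            · rcases List.mem_append.mp h2 with h2 | h2
              · exact Or.inr ⟨h1, h2⟩
              · simp only [List.mem_singleton] at h2
                exact absurd h2 hyx)
    simp only [List.append_assoc, List.singleton_append] at hres
    exact hres

lemma pv_bUpd_step (cycles : List (List Int)) (j v : Int)
    (h0 : 0 ≤ v) (hvj : v < j) (hjm : j < (cycles.length : Int))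
    (hov : pvOv cycles v j) :
    bUpd j (pvAdj cycles (pvRowQB cycles j v)) v = pvAdj cycles (pvRowQB cycles j (v + 1)) := by
  unfold bUpd
  have hgv : PySem.List.pyGetD (pvAdj cycles (pvRowQB cycles j v)) v [] = pvRowQB cycles j v v :=
    pv_getD_adj cycles _ v h0 (by omega)
  have hnm1 : j ∉ pvRowQB cycles j v v := by
    intro hmem
    have h2 := (List.mem_filter.mp hmem).2
    simp only [pvQB, decide_eq_true_eq] at h2
    obtain ⟨a, b, c⟩ := h2
    omega
  have e1 : PySem.Set.add (pvRowQB cycles j v v) j = pvRowQB cycles j (v + 1) v := by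
    rw [PySem.Set.add_of_not_mem hnm1]
    unfold pvRowQB
    refine (pv_filter_snoc (pvQB cycles j v v) (pvQB cycles j (v + 1) v) j _ (by omega) hjm
      ?_ ?_ ?_ ?_ ?_).symm
    · intro j' hj'
      simp only [pvQB]
      apply decide_eq_decide.mpr
      constructor
      · rintro ⟨a, b, c⟩; exact ⟨a, b, by omega⟩
      · rintro ⟨a, b, c⟩; exact ⟨a, b, by omega⟩
    · simp only [pvQB, decide_eq_false_iff_not]
      rintro ⟨a, b, c⟩; omega
    · simp only [pvQB, decide_eq_true_eq]
      exact ⟨by omega, hov, by omega⟩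
    · intro j' hj'
      simp only [pvQB, decide_eq_false_iff_not]
      rintro ⟨a, b, c⟩; omega
    · intro j' hj'
      simp only [pvQB, decide_eq_false_iff_not]
      rintro ⟨a, b, c⟩; omega
  have e2 : PySem.List.pySetD (pvAdj cycles (pvRowQB cycles j v)) v (pvRowQB cycles j (v + 1) v)
      = pvAdj cycles (fun k => if k = v then pvRowQB cycles j (v + 1) v else pvRowQB cycles j v k) := by
    rw [PySem.List.pySetD_of_nonneg _ _ h0]
    unfold pvAdj
    exact pv_set_map _ _ _ _ h0 (by omega)
  simp only [hgv]
  rw [e1, e2]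
  have hgj : PySem.List.pyGetD
      (pvAdj cycles (fun k => if k = v then pvRowQB cycles j (v + 1) v else pvRowQB cycles j v k))
      j [] = pvRowQB cycles j v j := by
    rw [pv_getD_adj cycles _ j (by omega) hjm]
    rw [if_neg (by omega)]
  have hnm2 : v ∉ pvRowQB cycles j v j := by
    intro hmem
    have h2 := (List.mem_filter.mp hmem).2
    simp only [pvQB, decide_eq_true_eq] at h2
    obtain ⟨a, b, c⟩ := h2
    omega
  have e3 : PySem.Set.add (pvRowQB cycles j v j) v = pvRowQB cycles j (v + 1) j := by
    rw [PySem.Set.add_of_not_mem hnm2]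
    unfold pvRowQB
    refine (pv_filter_snoc (pvQB cycles j v j) (pvQB cycles j (v + 1) j) v _ h0 (by omega)
      ?_ ?_ ?_ ?_ ?_).symm
    · intro j' hj'
      simp only [pvQB]
      apply decide_eq_decide.mpr
      constructor
      · rintro ⟨a, b, c⟩; exact ⟨a, b, by omega⟩
      · rintro ⟨a, b, c⟩; exact ⟨a, b, by omega⟩
    · simp only [pvQB, decide_eq_false_iff_not]
      rintro ⟨a, b, c⟩; omega
    · simp only [pvQB, decide_eq_true_eq]
      exact ⟨by omega, pv_ov_symm hov, by omega⟩
    · intro j' hj'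
      simp only [pvQB, decide_eq_false_iff_not]
      rintro ⟨a, b, c⟩; omega
    · intro j' hj'
      simp only [pvQB, decide_eq_false_iff_not]
      rintro ⟨a, b, c⟩; omega
  rw [hgj, e3]
  rw [PySem.List.pySetD_of_nonneg _ _ (by omega : (0:Int) ≤ j)]
  unfold pvAdj
  rw [pv_set_map _ _ _ _ (by omega) hjm]
  apply List.map_congr_left
  intro k hk
  have hk' := (PySem.List.mem_pyRange_one).mp hk
  by_cases hkj : k = j
  · rw [if_pos hkj, hkj]
  · rw [if_neg hkj]
    by_cases hkv : k = v
    · rw [if_pos hkv, hkv]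
    · rw [if_neg hkv]
      unfold pvRowQB
      apply List.filter_congr
      intro j' hj'
      simp only [pvQB]
      apply decide_eq_decide.mpr
      constructor
      · rintro ⟨a, b, c⟩; exact ⟨a, b, by omega⟩
      · rintro ⟨a, b, c⟩
        refine ⟨a, b, ?_⟩
        rcases c with c | ⟨c1, c2⟩
        · exact Or.inl c
        · by_cases hmv : min j' k < v
          · exact Or.inr ⟨c1, hmv⟩
          · exfalso
            omega

-- rows do not change between one processed partner and the next candidate value
lemma pv_rowqb_congr (cycles : List (List Int)) (j v : Int)
    (hvj : v < j) (hno : ¬ pvOv cycles v j) :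
    pvAdj cycles (pvRowQB cycles j v) = pvAdj cycles (pvRowQB cycles j (v + 1)) := by
  unfold pvAdj
  apply List.map_congr_left
  intro k hk
  have hk' := (PySem.List.mem_pyRange_one).mp hk
  unfold pvRowQB
  apply List.filter_congr
  intro j' hj'
  have hj'' := (PySem.List.mem_pyRange_one).mp hj'
  simp only [pvQB]
  apply decide_eq_decide.mpr
  constructor
  · rintro ⟨a, b, c⟩; exact ⟨a, b, by omega⟩
  · rintro ⟨a, b, c⟩
    refine ⟨a, b, ?_⟩
    rcases c with c | ⟨c1, c2⟩
    · exact Or.inl c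
    · by_cases hmv : min j' k < v
      · exact Or.inr ⟨c1, hmv⟩
      · exfalso
        have hcase : (k = v ∧ j' = j) ∨ (k = j ∧ j' = v) := by omega
        rcases hcase with ⟨hk1, hj1⟩ | ⟨hk1, hj1⟩
        · subst hk1; subst hj1; exact hno b
        · subst hk1; subst hj1; exact hno (pv_ov_symm b)

lemma pv_bUpd_fold (cycles : List (List Int)) (j : Int) (hjm : j < (cycles.length : Int)) :
    ∀ (n : Nat) (v : Int), 0 ≤ v → v ≤ (cycles.length : Int) →
      ((cycles.length : Int) - v).toNat = n →
      (((PySem.List.pyRange v (cycles.length : Int) 1).filter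
          (fun i => decide (i < j ∧ pvOv cycles i j))).foldl (bUpd j)
          (pvAdj cycles (pvRowQB cycles j v)))
        = pvAdj cycles (pvRowQB cycles j (cycles.length : Int)) := by
  intro n
  induction n with
  | zero =>
    intro v h0 hvm hn
    have hv' : v = (cycles.length : Int) := by omega
    subst hv'
    rw [PySem.List.pyRange_one_eq_nil (le_refl _)]
    rfl
  | succ n ih =>
    intro v h0 hvm hn
    have hlt : v < (cycles.length : Int) := by omega
    rw [PySem.List.pyRange_one_cons hlt]
    rw [List.filter_cons]
    by_cases hp : v < j ∧ pvOv cycles v j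
    · rw [if_pos (by simpa using hp)]
      simp only [List.foldl_cons]
      rw [pv_bUpd_step cycles j v h0 hp.1 hjm hp.2]
      exact ih (v + 1) (by omega) (by omega) (by omega)
    · rw [if_neg (by simpa using hp)]
      by_cases hvj : v < j
      · have hno : ¬ pvOv cycles v j := fun h => hp ⟨hvj, h⟩
        rw [pv_rowqb_congr cycles j v hvj hno]
        exact ih (v + 1) (by omega) (by omega) (by omega)
      · -- v ≥ j: rows with min = v... show pvRowQB j v = pvRowQB j (v+1)
        have : pvAdj cycles (pvRowQB cycles j v) = pvAdj cycles (pvRowQB cycles j (v + 1)) := by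
          unfold pvAdj
          apply List.map_congr_left
          intro k hk
          have hk' := (PySem.List.mem_pyRange_one).mp hk
          unfold pvRowQB
          apply List.filter_congr
          intro j' hj'
          have hj'' := (PySem.List.mem_pyRange_one).mp hj'
          simp only [pvQB]
          apply decide_eq_decide.mpr
          constructor
          · rintro ⟨a, b, c⟩; exact ⟨a, b, by omega⟩
          · rintro ⟨a, b, c⟩; exact ⟨a, b, by omega⟩
        rw [this]
        exact ih (v + 1) (by omega) (by omega) (by omega)

lemma pv_rowqb_start (cycles : List (List Int)) (j : Int) :
    pvAdj cycles (pvRowB cycles j) = pvAdj cycles (pvRowQB cycles j 0) := by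
  unfold pvAdj
  apply List.map_congr_left
  intro k hk
  have hk' := (PySem.List.mem_pyRange_one).mp hk
  unfold pvRowB pvRowQB
  apply List.filter_congr
  intro j' hj'
  have hj'' := (PySem.List.mem_pyRange_one).mp hj'
  simp only [pvTB, pvQB]
  apply decide_eq_decide.mpr
  constructor
  · rintro ⟨a, b, c⟩; exact ⟨a, b, Or.inl c⟩
  · rintro ⟨a, b, c⟩; exact ⟨a, b, by omega⟩

lemma pv_rowqb_end (cycles : List (List Int)) (j : Int) :
    pvAdj cycles (pvRowQB cycles j (cycles.length : Int))
      = pvAdj cycles (pvRowB cycles (j + 1)) := by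
  unfold pvAdj
  apply List.map_congr_left
  intro k hk
  have hk' := (PySem.List.mem_pyRange_one).mp hk
  unfold pvRowB pvRowQB
  apply List.filter_congr
  intro j' hj'
  have hj'' := (PySem.List.mem_pyRange_one).mp hj'
  simp only [pvTB, pvQB]
  apply decide_eq_decide.mpr
  constructor
  · rintro ⟨a, b, c⟩; exact ⟨a, b, by omega⟩
  · rintro ⟨a, b, c⟩; exact ⟨a, b, by omega⟩

-- one full outer iteration of B
lemma pv_bStep (cycles : List (List Int)) (j : Int)
    (h0 : 0 ≤ j) (hjm : j < (cycles.length : Int))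
    (seen : PySem.Dict Int (PySem.Set Int)) (hs : pvSeenInv cycles j seen) :
    (bStep (seen, pvAdj cycles (pvRowB cycles j)) (j, PySem.List.pyGetD cycles j [])).2
        = pvAdj cycles (pvRowB cycles (j + 1)) ∧
    pvSeenInv cycles (j + 1)
      (bStep (seen, pvAdj cycles (pvRowB cycles j)) (j, PySem.List.pyGetD cycles j [])).1 := by
  have hfold := pv_bInner_fold cycles j (PySem.List.pyGetD cycles j []) []
    (PySem.Set.empty) seen
    (List.nodup_nil)
    (by intro i _; simp)
    (by
      intro x
      refine ⟨(hs x).1, ?_⟩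
      intro i
      rw [((hs x).2 i)]
      simp)
  obtain ⟨hPnd, hPmem, hSnew⟩ := hfold
  set pr := (PySem.List.pyGetD cycles j []).foldl (bInner j)
      ((PySem.Set.empty : PySem.Set Int), seen) with hpr
  have hbs : bStep (seen, pvAdj cycles (pvRowB cycles j)) (j, PySem.List.pyGetD cycles j [])
      = (pr.2, (PySem.List.sorted (PySem.Set.discard pr.1 j) (fun x => x) false).foldl (bUpd j)
          (pvAdj cycles (pvRowB cycles j))) := rfl
  rw [hbs]
  constructor
  · -- adjacency part
    have hpnd : (PySem.Set.discard pr.1 j).Nodup := PySem.Set.nodup_discard _ _ hPnd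
    have hpmem : ∀ i, i ∈ PySem.Set.discard pr.1 j ↔
        (0 ≤ i ∧ i < (cycles.length : Int) ∧ i < j ∧ pvOv cycles i j) := by
      intro i
      rw [PySem.Set.mem_discard]
      constructor
      · rintro ⟨h1, h2⟩
        obtain ⟨x, hx1, hx2, hx3, hx4⟩ := (hPmem i h2).mp h1
        simp only [List.nil_append] at hx1
        refine ⟨hx2, by omega, hx3, ⟨x, ?_, ?_⟩⟩
        · exact (PySem.Set.mem_ofList _ _).mpr hx4
        · exact (PySem.Set.mem_ofList _ _).mpr hx1
      · rintro ⟨h1, h2, h3, x, hx1, hx2⟩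
        have hij : i ≠ j := by omega
        refine ⟨(hPmem i hij).mpr ⟨x, ?_, h1, h3, ?_⟩, hij⟩
        · simpa using (PySem.Set.mem_ofList _ _).mp hx2
        · exact (PySem.Set.mem_ofList _ _).mp hx1
    have hsorted : PySem.List.sorted (PySem.Set.discard pr.1 j) (fun x => x) false
        = (PySem.List.pyRange 0 (cycles.length : Int) 1).filter
            (fun i => decide (i < j ∧ pvOv cycles i j)) := by
      apply PySem.List.sorted_id_eq_of_perm_of_pairwise
      · apply (List.perm_ext_iff_of_nodup ?_ hpnd).mpr
        · intro i
          rw [List.mem_filter, PySem.List.mem_pyRange_one, hpmem i]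
          simp only [decide_eq_true_eq]
          constructor
          · rintro ⟨⟨ha, hb⟩, hc, hd⟩; exact ⟨ha, hb, hc, hd⟩
          · rintro ⟨ha, hb, hc, hd⟩; exact ⟨⟨ha, hb⟩, hc, hd⟩
        · exact List.Nodup.filter _ (PySem.List.nodup_pyRange_one 0 _)
      · apply List.Pairwise.imp (fun {a b} h => le_of_lt h)
        exact List.Pairwise.filter _ (PySem.List.pairwise_lt_pyRange_one 0 _)
    rw [hsorted, pv_rowqb_start cycles j,
        pv_bUpd_fold cycles j hjm ((cycles.length : Int) - 0).toNat 0 (le_refl _) (by omega) rfl]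
    exact pv_rowqb_end cycles j
  · -- seen part
    intro x
    refine ⟨(hSnew x).1, ?_⟩
    intro i
    rw [((hSnew x).2 i)]
    simp only [List.nil_append]
    constructor
    · rintro (⟨h1, h2, h3⟩ | ⟨h1, h2⟩)
      · exact ⟨h1, by omega, h3⟩
      · subst h1; exact ⟨h0, by omega, h2⟩
    · rintro ⟨h1, h2, h3⟩
      by_cases hij : i = j
      · exact Or.inr ⟨hij, by rw [← hij]; exact h3⟩
      · exact Or.inl ⟨h1, by omega, h3⟩

lemma pv_bOuter_fold (cycles : List (List Int)) :
    ∀ (n : Nat) (t : Int) (seen : PySem.Dict Int (PySem.Set Int)),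
      0 ≤ t → t ≤ (cycles.length : Int) → ((cycles.length : Int) - t).toNat = n →
      pvSeenInv cycles t seen →
      ((PySem.List.enumerate (cycles.drop t.toNat) t).foldl bStep
          (seen, pvAdj cycles (pvRowB cycles t))).2
        = pvAdj cycles (pvRowB cycles (cycles.length : Int)) := by
  intro n
  induction n with
  | zero =>
    intro t seen h0 htm hn _
    have ht : t.toNat = cycles.length := by omega
    rw [List.drop_eq_nil_of_le (by omega)]
    have ht' : t = (cycles.length : Int) := by omega
    subst ht'
    simp [PySem.List.enumerate]
  | succ n ih =>
    intro t seen h0 htm hn hs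
    have hlt : t.toNat < cycles.length := by omega
    rw [List.drop_eq_getElem_cons hlt, PySem.List.enumerate_cons]
    simp only [List.foldl_cons]
    have hget : PySem.List.pyGetD cycles t [] = cycles[t.toNat] :=
      PySem.List.pyGetD_eq_getElem cycles [] h0 (by omega)
    rw [← hget]
    obtain ⟨hadj, hseen⟩ := pv_bStep cycles t h0 (by omega) seen hs
    have hstate : bStep (seen, pvAdj cycles (pvRowB cycles t)) (t, PySem.List.pyGetD cycles t [])
        = ((bStep (seen, pvAdj cycles (pvRowB cycles t)) (t, PySem.List.pyGetD cycles t [])).1,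
           pvAdj cycles (pvRowB cycles (t + 1))) := by
      rw [← hadj]
    rw [hstate]
    have hdrop : cycles.drop (t.toNat + 1) = cycles.drop (t + 1).toNat := by
      congr 1
      omega
    rw [hdrop]
    exact ih (t + 1) _ (by omega) (by omega) (by omega) hseen

lemma pv_B_eq (cycles : List (List Int)) :
    build_omega_adj_alt cycles = pvAdj cycles (pvRowB cycles (cycles.length : Int)) := by
  show ((PySem.List.enumerate cycles 0).foldl bStep
      ((PySem.Dict.empty : PySem.Dict Int (PySem.Set Int)),
       cycles.map (fun _ => (PySem.Set.empty : PySem.Set Int)))).2 = _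
  have hinit : cycles.map (fun _ => (PySem.Set.empty : PySem.Set Int))
      = pvAdj cycles (pvRowB cycles 0) := by
    apply List.ext_getElem
    · simp [pvAdj, PySem.List.length_pyRange_one]
    · intro n h1 h2
      simp only [List.getElem_map, pvAdj]
      have h3 : n < (PySem.List.pyRange 0 (cycles.length : Int) 1).length := by
        simpa [pvAdj] using h2
      have hg : (PySem.List.pyRange 0 (cycles.length : Int) 1)[n]'h3 = ((n : Nat) : Int) := by
        rw [PySem.List.getElem_pyRange_one]
        omega
      rw [hg]
      unfold pvRowB
      have hnil : (PySem.List.pyRange 0 (cycles.length : Int) 1).filter (pvTB cycles 0 (n : Int)) = [] := by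
        apply List.filter_eq_nil_iff.mpr
        intro j hj
        have hj' := (PySem.List.mem_pyRange_one).mp hj
        simp only [pvTB, decide_eq_true_eq]
        rintro ⟨a, b, c⟩
        omega
      rw [hnil]
      rfl
  rw [hinit]
  have hdrop : cycles = cycles.drop (0 : Int).toNat := by simp
  conv_lhs => rw [hdrop]
  exact pv_bOuter_fold cycles (cycles.length : Int).toNat 0 PySem.Dict.empty
    (le_refl _) (by omega) (by omega)
    (by
      intro x
      refine ⟨by simp [PySem.Dict.getD_empty], fun i => ?_⟩
      rw [PySem.Dict.getD_empty]
      simp only [List.not_mem_nil, false_iff]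
      rintro ⟨h1, h2, _⟩
      omega)

lemma pv_rowB_eq_row (cycles : List (List Int)) :
    pvAdj cycles (pvRowB cycles (cycles.length : Int))
      = pvAdj cycles (pvRow cycles (cycles.length : Int)) := by
  unfold pvAdj
  apply List.map_congr_left
  intro k hk
  have hk' := (PySem.List.mem_pyRange_one).mp hk
  unfold pvRowB pvRow
  apply List.filter_congr
  intro j hj
  have hj' := (PySem.List.mem_pyRange_one).mp hj
  simp only [pvTB, pvT]
  apply decide_eq_decide.mpr
  constructor
  · rintro ⟨a, b, c⟩; exact ⟨a, b, by omega⟩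
  · rintro ⟨a, b, c⟩; exact ⟨a, b, by omega⟩

-- ===== VERDICT (by name: the statement is the Claim_ definition above) =====
theorem build_omega_adj_spec : Claim_equal_build_omega_adj := by
  intro cycles _
  show build_omega_adj cycles = build_omega_adj_alt cycles
  rw [pv_A_eq, pv_B_eq, pv_rowB_eq_row]
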